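-- pv_equiv track=rewrite | github.com/Douae-MEJHOUDI/GraphRAG-in-Supply-Chain | src/graph/llm_builder.py | _build_registry_context
-- ===== SOURCE A (Python) =====
-- from collections import defaultdict
--
-- def _build_registry_context(registry: dict[str, str], max_entries: int) -> str:
--     """
--     Format the running entity registry as a prompt context string.
--     Groups by entity type and caps at max_entries total.
--     """
--     if not registry:
--         return ""
--
--     by_type: dict[str, list[str]] = defaultdict(list)
--     for name, etype in registry.items():
--         by_type[etype].append(name)
--
--     lines = ["Known entities (reuse these exact names):"]
--     count = 0
--     for etype in sorted(by_type):
--         names = sorted(by_type[etype])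
--         for name in names:
--             if count >= max_entries:
--                 lines.append(f"  ... ({len(registry) - count} more entities not shown)")
--                 return "\n".join(lines)
--             lines.append(f"  {name} ({etype})")
--             count += 1
--     return "\n".join(lines)
-- ===== SOURCE B (Python) =====
-- def _build_registry_context(registry: dict[str, str], max_entries: int) -> str:
--     """
--     Format the running entity registry as a prompt context string.
--     Same output as the grouped version: entries sorted by (type, name),
--     capped at max_entries total.
--     """
--     if not registry:
--         return ""
--
--     items = sorted(registry.items(), key=lambda kv: (kv[1], kv[0]))
--     lines = ["Known entities (reuse these exact names):"]
--     count = 0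
--     for name, etype in items:
--         if count >= max_entries:
--             lines.append(f"  ... ({len(registry) - count} more entities not shown)")
--             return "\n".join(lines)
--         lines.append(f"  {name} ({etype})")
--         count += 1
--     return "\n".join(lines)
-- ===== Notes on version B (the rewrite author's own statement) =====
-- stated objective: simpler
-- what changed: Replaces the defaultdict grouping, per-type sorting and nested loops with one flat sort of the items by the (type, name) pair and a single capped loop.
import Mathlib
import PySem

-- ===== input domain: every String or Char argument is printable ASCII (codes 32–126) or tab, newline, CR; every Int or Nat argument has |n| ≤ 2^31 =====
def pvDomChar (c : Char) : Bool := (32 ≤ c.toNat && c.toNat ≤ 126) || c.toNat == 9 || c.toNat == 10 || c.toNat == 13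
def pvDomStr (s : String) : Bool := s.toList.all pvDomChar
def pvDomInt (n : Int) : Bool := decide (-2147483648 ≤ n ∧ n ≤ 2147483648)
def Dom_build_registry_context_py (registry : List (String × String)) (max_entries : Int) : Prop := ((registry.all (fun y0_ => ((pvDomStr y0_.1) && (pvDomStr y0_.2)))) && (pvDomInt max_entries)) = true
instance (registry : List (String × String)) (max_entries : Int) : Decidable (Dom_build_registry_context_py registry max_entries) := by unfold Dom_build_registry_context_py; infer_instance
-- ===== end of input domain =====

-- B replaces A's defaultdict grouping + per-type sorting + nested loops with one flat
-- sort of the items by the (type, name) pair and a single capped loop (objective: simpler).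

-- ===== PORT A =====
-- shared formatting helpers (the two f-strings)
def pvEntryLine (n t : String) : String := "  " ++ n ++ " (" ++ t ++ ")"
def pvMoreLine (total count : Int) : String := "  ... (" ++ PySem.Int.toStr (total - count) ++ " more entities not shown)"

-- A's inner 'for name in names' loop: early return carries the finished lines in .inr
def pvAInner (etype : String) (total max_entries : Int) : List String → List String → Int → (List String × Int) ⊕ List String
  | [], lines, count => .inl (lines, count)
  | n :: ns, lines, count =>
    if max_entries ≤ count then .inr (lines ++ [pvMoreLine total count])
    else pvAInner etype total max_entries ns (lines ++ [pvEntryLine n etype]) (count + 1)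

-- A's outer 'for etype in sorted(by_type)' loop
def pvAOuter (byType : PySem.Dict String (List String)) (total max_entries : Int) : List String → List String → Int → List String
  | [], lines, _ => lines
  | t :: ts, lines, count =>
    match pvAInner t total max_entries (PySem.List.sorted (byType.getD t []) (fun x => x) false) lines count with
    | .inl s => pvAOuter byType total max_entries ts s.1 s.2
    | .inr lines' => lines'

def build_registry_context_py (registry : List (String × String)) (max_entries : Int) : String :=
  if registry = [] then ""
  else
    let byType : PySem.Dict String (List String) :=
      registry.foldl (fun d p => d.modify p.2 [] (fun v => v ++ [p.1])) PySem.Dict.empty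
    PySem.Str.join "\n"
      (pvAOuter byType (registry.length : Int) max_entries
        (PySem.List.sorted byType.keys (fun x => x) false)
        ["Known entities (reuse these exact names):"] 0)

-- ===== PORT B =====
-- Python's tuple key (kv[1], kv[0]) compares lexicographically: String ×ₗ String
def pvKey (p : String × String) : String ×ₗ String := toLex (p.2, p.1)

-- B's single 'for name, etype in items' loop
def pvBLoop (total max_entries : Int) : List (String × String) → List String → Int → List String
  | [], lines, _ => lines
  | p :: rest, lines, count =>
    if max_entries ≤ count then lines ++ [pvMoreLine total count]
    else pvBLoop total max_entries rest (lines ++ [pvEntryLine p.1 p.2]) (count + 1)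

def build_registry_context_py_alt (registry : List (String × String)) (max_entries : Int) : String :=
  if registry = [] then ""
  else
    PySem.Str.join "\n"
      (pvBLoop (registry.length : Int) max_entries
        (PySem.List.sorted registry pvKey false)
        ["Known entities (reuse these exact names):"] 0)

-- ===== PRECONDITION & SPEC =====
def Spec_build_registry_context_py (registry : List (String × String)) (max_entries : Int) (out : String) : Prop := out = build_registry_context_py_alt registry max_entries
instance (registry : List (String × String)) (max_entries : Int) (out : String) : Decidable (Spec_build_registry_context_py registry max_entries out) := by unfold Spec_build_registry_context_py; infer_instance

-- ===== CLAIM (what is proved, stated in full; the proofs are below) =====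
def Claim_equal_build_registry_context_py : Prop := ∀ (registry : List (String × String)) (max_entries : Int), Dom_build_registry_context_py registry max_entries → Spec_build_registry_context_py registry max_entries (build_registry_context_py registry max_entries)

-- ===== LEMMAS AND PROOFS =====

-- the per-type group of lines A produces for type t, as pairs
def pvGroup (byType : PySem.Dict String (List String)) (t : String) : List (String × String) :=
  (PySem.List.sorted (byType.getD t []) (fun x => x) false).map (fun n => (n, t))

-- loop fusion, inner: B's loop over one group ++ rest behaves like A's inner loop then B on rest
theorem pvB_group (t : String) (total max_entries : Int) :
    ∀ (names : List String) (rest : List (String × String)) (lines : List String) (count : Int),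
      pvBLoop total max_entries (names.map (fun n => (n, t)) ++ rest) lines count =
        (match pvAInner t total max_entries names lines count with
          | .inl s => pvBLoop total max_entries rest s.1 s.2
          | .inr lines' => lines') := by
  intro names
  induction names with
  | nil => intro rest lines count; simp [pvAInner]
  | cons n ns ih =>
      intro rest lines count
      simp only [List.map_cons, List.cons_append, pvBLoop, pvAInner]
      by_cases h : max_entries ≤ count
      · simp [h]
      · simp [h, ih]

-- loop fusion, outer: A's nested loops equal B's flat loop over the concatenated groups
theorem pvA_eq_pvB_flat (byType : PySem.Dict String (List String)) (total max_entries : Int) :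
    ∀ (ts : List String) (lines : List String) (count : Int),
      pvAOuter byType total max_entries ts lines count =
        pvBLoop total max_entries (ts.flatMap (pvGroup byType)) lines count := by
  intro ts
  induction ts with
  | nil => intro lines count; simp [pvAOuter, pvBLoop]
  | cons t ts ih =>
      intro lines count
      simp only [List.flatMap_cons, pvAOuter, pvGroup]
      rw [pvB_group]
      cases pvAInner t total max_entries (PySem.List.sorted (byType.getD t []) (fun x => x) false) lines count with
      | inl s => simp [ih]
      | inr l => simp

-- grouping content: by_type[t] is the names of registry whose type is t, in order
theorem pvGetD_byType (registry : List (String × String)) (t : String) :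
    (registry.foldl (fun d p => d.modify p.2 [] (fun v => v ++ [p.1])) PySem.Dict.empty).getD t []
      = (registry.filter (fun p => p.2 == t)).map (fun p => p.1) := by
  have h : registry.foldl (fun d p => d.modify p.2 [] (fun v => v ++ [p.1])) PySem.Dict.empty
      = (registry.map (fun p => (p.2, p.1))).foldl (fun d q => d.modify q.1 [] (fun v => v ++ [q.2])) PySem.Dict.empty := by
    rw [List.foldl_map]
  rw [h, PySem.Dict.getD_foldl_modify_append]
  simp [List.filter_map, Function.comp_def, List.map_map]

-- the keys of by_type are the distinct types
theorem pvKeys_byType (registry : List (String × String)) :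
    (registry.foldl (fun d p => d.modify p.2 [] (fun v => v ++ [p.1])) PySem.Dict.empty).keys
      = PySem.Set.ofList (registry.map (fun p => p.2)) := by
  have h := PySem.Dict.keys_foldl_modify_key registry (fun p => p.2) ([] : List String)
    (fun _ p v => v ++ [p.1]) PySem.Dict.empty
  simpa [PySem.Set.update_nil_left] using h

-- distinct covering types: flatMap of the filters is a permutation of the list
theorem pvPerm_flat_filter :
    ∀ (ts : List String) (l : List (String × String)), ts.Nodup → (∀ p ∈ l, p.2 ∈ ts) →
      (ts.flatMap (fun t => l.filter (fun p => p.2 == t))).Perm l := by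
  intro ts
  induction ts with
  | nil =>
      intro l _ h
      have : l = [] := by
        cases l with
        | nil => rfl
        | cons p r => exact absurd (h p (by simp)) (by simp)
      simp [this]
  | cons t ts ih =>
      intro l hnd h
      simp only [List.flatMap_cons]
      have hrest : ∀ t' ∈ ts, l.filter (fun p => p.2 == t') = (l.filter (fun p => !(p.2 == t))).filter (fun p => p.2 == t') := by
        intro t' ht'
        rw [List.filter_filter]
        apply List.filter_congr
        intro p _
        by_cases hp : p.2 = t'
        · have : t' ≠ t := by rintro rfl; exact (List.nodup_cons.mp hnd).1 ht'
          simp [hp, this]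
        · simp [hp]
      have hfm : ts.flatMap (fun t' => l.filter (fun p => p.2 == t'))
          = ts.flatMap (fun t' => (l.filter (fun p => !(p.2 == t))).filter (fun p => p.2 == t')) := by
        exact List.flatMap_congr hrest
      rw [hfm]
      have hperm := ih (l.filter (fun p => !(p.2 == t))) (List.nodup_cons.mp hnd).2
        (by
          intro p hp
          have hmem := List.mem_of_mem_filter hp
          have hne : ¬ (p.2 == t) = true := by
            have := List.of_mem_filter hp
            simpa using this
          have := h p hmem
          simp at hne
          simpa [hne] using this)
      exact (hperm.append_left _).trans (List.filter_append_perm _ l)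

-- each group is a permutation of the corresponding filter of registry
theorem pvGroup_perm_filter (registry : List (String × String)) (t : String) :
    (pvGroup (registry.foldl (fun d p => d.modify p.2 [] (fun v => v ++ [p.1])) PySem.Dict.empty) t).Perm
      (registry.filter (fun p => p.2 == t)) := by
  unfold pvGroup
  rw [pvGetD_byType]
  have h1 : (PySem.List.sorted ((registry.filter (fun p => p.2 == t)).map (fun p => p.1)) (fun x => x) false).Perm
      ((registry.filter (fun p => p.2 == t)).map (fun p => p.1)) := PySem.List.sorted_perm _ _ _
  refine (h1.map _).trans ?_
  rw [List.map_map]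
  have : ∀ p ∈ registry.filter (fun p => p.2 == t), ((fun n => (n, t)) ∘ fun p => p.1) p = p := by
    intro p hp
    have := List.of_mem_filter hp
    have h2 : p.2 = t := by simpa using this
    cases p; simp_all
  rw [List.map_congr_left this]
  simp

-- the flatMap of A's groups is a permutation of registry
theorem pvFlat_perm (registry : List (String × String)) :
    (((PySem.List.sorted (registry.foldl (fun d p => d.modify p.2 [] (fun v => v ++ [p.1])) PySem.Dict.empty).keys (fun x => x) false)).flatMap
      (pvGroup (registry.foldl (fun d p => d.modify p.2 [] (fun v => v ++ [p.1])) PySem.Dict.empty))).Perm registry := by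
  have hkeys := pvKeys_byType registry
  have hsp := PySem.List.sorted_perm (registry.foldl (fun d p => d.modify p.2 [] (fun v => v ++ [p.1])) PySem.Dict.empty).keys (fun x : String => x) false
  have hnd : (PySem.List.sorted (registry.foldl (fun d p => d.modify p.2 [] (fun v => v ++ [p.1])) PySem.Dict.empty).keys (fun x : String => x) false).Nodup := by
    rw [hsp.nodup_iff, hkeys]; exact PySem.Set.nodup_ofList _
  have hcov : ∀ p ∈ registry, p.2 ∈ PySem.List.sorted (registry.foldl (fun d p => d.modify p.2 [] (fun v => v ++ [p.1])) PySem.Dict.empty).keys (fun x : String => x) false := by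
    intro p hp
    rw [PySem.List.mem_sorted, hkeys, PySem.Set.mem_ofList]
    exact List.mem_map_of_mem hp
  refine (List.Perm.flatMap_left _ (fun t _ => pvGroup_perm_filter registry t)).trans ?_
  exact pvPerm_flat_filter _ registry hnd hcov

-- the flatMap of A's groups is sorted by pvKey
theorem pvFlat_pairwise (registry : List (String × String)) :
    ((PySem.List.sorted (registry.foldl (fun d p => d.modify p.2 [] (fun v => v ++ [p.1])) PySem.Dict.empty).keys (fun x : String => x) false).flatMap
      (pvGroup (registry.foldl (fun d p => d.modify p.2 [] (fun v => v ++ [p.1])) PySem.Dict.empty))).Pairwise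
      (fun a b => pvKey a ≤ pvKey b) := by
  set byType := registry.foldl (fun d p => d.modify p.2 [] (fun v => v ++ [p.1])) PySem.Dict.empty with hbt
  rw [List.pairwise_flatMap]
  constructor
  · intro t _
    unfold pvGroup
    rw [List.pairwise_map]
    have := PySem.List.sorted_pairwise (byType.getD t []) (fun x : String => x)
    refine this.imp ?_
    intro a b hab
    simp [pvKey, Prod.Lex.toLex_le_toLex, hab]
  · have hle := PySem.List.sorted_pairwise byType.keys (fun x : String => x)
    have hnd : (PySem.List.sorted byType.keys (fun x : String => x) false).Nodup := by
      rw [(PySem.List.sorted_perm _ _ _).nodup_iff, pvKeys_byType]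
      exact PySem.Set.nodup_ofList _
    have hlt : (PySem.List.sorted byType.keys (fun x : String => x) false).Pairwise (fun a b => a < b) :=
      (hle.and hnd).imp (fun h => lt_of_le_of_ne h.1 h.2)
    refine hlt.imp ?_
    intro t t' htt x hx y hy
    have hxt : x.2 = t := by
      unfold pvGroup at hx
      obtain ⟨n, _, rfl⟩ := List.mem_map.mp hx
      rfl
    have hyt : y.2 = t' := by
      unfold pvGroup at hy
      obtain ⟨n, _, rfl⟩ := List.mem_map.mp hy
      rfl
    refine le_of_lt ?_
    simp only [pvKey, Prod.Lex.toLex_lt_toLex, hxt, hyt]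
    exact Or.inl htt

-- core: B's flat sorted list IS the concatenation of A's sorted groups
theorem pvSorted_eq_flat (registry : List (String × String)) :
    PySem.List.sorted registry pvKey false
      = (PySem.List.sorted (registry.foldl (fun d p => d.modify p.2 [] (fun v => v ++ [p.1])) PySem.Dict.empty).keys (fun x => x) false).flatMap
          (pvGroup (registry.foldl (fun d p => d.modify p.2 [] (fun v => v ++ [p.1])) PySem.Dict.empty)) := by
  have hinj : Function.Injective pvKey := by
    intro a b h
    have : (a.2, a.1) = (b.2, b.1) := congrArg ofLex h
    cases a; cases b; simp_all
  exact PySem.List.eq_of_perm_of_pairwise_le_of_injective pvKey hinj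
    ((PySem.List.sorted_perm _ _ _).trans (pvFlat_perm registry).symm)
    (PySem.List.sorted_pairwise _ _)
    (pvFlat_pairwise registry)

-- ===== VERDICT (by name: the statement is the Claim_ definition above) =====
theorem build_registry_context_py_spec : Claim_equal_build_registry_context_py := by
  intro registry max_entries _
  unfold Spec_build_registry_context_py build_registry_context_py build_registry_context_py_alt
  by_cases h : registry = []
  · simp [h]
  · simp only [h, if_false]
    rw [pvA_eq_pvB_flat, ← pvSorted_eq_flat]
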